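-- pv_equiv track=rewrite | github.com/kimjunha1231/algorithm | codingtest/optional/optional4.py | foo
-- ===== SOURCE A (Python) =====
-- def foo(numbers):
--     number_list = list(map(int, numbers.split()))
--     odd_list = []
--     even_list = []
--     for i in range(len(number_list)):
--         if number_list[i] % 2 == 1:
--             odd_list.append(i + 1)
--         else:
--             even_list.append(i + 1)
--     if len(odd_list) == 1:
--         return odd_list[0]
--     if len(even_list) == 1:
--         return even_list[0]
-- ===== SOURCE B (Python) =====
-- def foo(numbers):
--     nums = [int(t) for t in numbers.split()]
--     odd = sum(1 for n in nums if n % 2 == 1)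
--     if odd == 1:
--         for i, n in enumerate(nums, 1):
--             if n % 2 == 1:
--                 return i
--     elif len(nums) - odd == 1:
--         for i, n in enumerate(nums, 1):
--             if n % 2 != 1:
--                 return i
-- ===== Notes on version B (the rewrite author's own statement) =====
-- stated objective: alternative
-- what changed: B no longer builds the two lists of 1-based positions: it counts odd elements in one pass and, only when a count is exactly 1, does a second scan that finds the first index of that parity, keeping the odd-before-even precedence.
import Mathlib
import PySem

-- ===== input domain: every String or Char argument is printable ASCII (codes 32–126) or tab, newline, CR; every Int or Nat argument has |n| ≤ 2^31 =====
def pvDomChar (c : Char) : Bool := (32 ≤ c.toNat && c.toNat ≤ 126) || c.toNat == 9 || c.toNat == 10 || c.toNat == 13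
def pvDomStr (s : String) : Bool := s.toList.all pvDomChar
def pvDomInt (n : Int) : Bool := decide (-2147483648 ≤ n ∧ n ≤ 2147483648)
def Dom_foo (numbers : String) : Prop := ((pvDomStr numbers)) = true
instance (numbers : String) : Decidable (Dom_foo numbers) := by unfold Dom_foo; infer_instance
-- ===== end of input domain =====

-- B replaces A's two accumulated position lists by an odd count plus an on-demand scan for the first
-- index of the outlier parity (objective: alternative decomposition, same O(n) cost).

-- ===== PORT A =====
-- the for-loop over range(len(number_list)) accumulating odd_list/even_list (1-based positions)
def fooLoop (xs : List Int) (i : Int) (odds evens : List Int) : List Int × List Int :=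
  match xs with
  | [] => (odds, evens)
  | n :: ns =>
    if PySem.Int.mod n 2 = 1 then fooLoop ns (i + 1) (odds ++ [i]) evens
    else fooLoop ns (i + 1) odds (evens ++ [i])

def foo (numbers : String) : Option Int :=
  match (PySem.Str.split₀ numbers).mapM PySem.Int.ofStr? with
  | none => none            -- int() raises ValueError; excluded by Pre_foo
  | some nums =>
    let p := fooLoop nums 1 [] []
    if p.1.length = 1 then p.1.head?
    else if p.2.length = 1 then p.2.head?
    else none

-- ===== PORT B =====
-- sum(1 for n in nums if n % 2 == 1)
def fooAltCount (xs : List Int) : Int :=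
  xs.foldl (fun c n => if PySem.Int.mod n 2 = 1 then c + 1 else c) 0

-- the enumerate(nums, 1) scan returning the first index whose element is odd (resp. even)
def fooAltFind (xs : List Int) (i : Int) (odd : Bool) : Option Int :=
  match xs with
  | [] => none
  | n :: ns => if (PySem.Int.mod n 2 = 1) = (odd = true) then some i else fooAltFind ns (i + 1) odd

def foo_alt (numbers : String) : Option Int :=
  match (PySem.Str.split₀ numbers).mapM PySem.Int.ofStr? with
  | none => none            -- int() raises ValueError; excluded by Pre_foo
  | some nums =>
    let odd := fooAltCount nums
    if odd = 1 then fooAltFind nums 1 true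
    else if (nums.length : Int) - odd = 1 then fooAltFind nums 1 false
    else none

-- ===== PRECONDITION & SPEC =====
-- Pre_ excludes exactly the strings with a token int() rejects, on which A raises ValueError.
def Pre_foo (numbers : String) : Prop :=
  (PySem.Str.split₀ numbers).all (fun t => (PySem.Int.ofStr? t).isSome) = true
instance (numbers : String) : Decidable (Pre_foo numbers) := by unfold Pre_foo; infer_instance
def pvWitness_foo : String := "2 3 5"

def Spec_foo (numbers : String) (out : Option Int) : Prop := out = foo_alt numbers
instance (numbers : String) (out : Option Int) : Decidable (Spec_foo numbers out) := by unfold Spec_foo; infer_instance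

-- ===== CLAIM (what is proved, stated in full; the proofs are below) =====
def Claim_equal_foo : Prop := ∀ (numbers : String), Dom_foo numbers → Pre_foo numbers → Spec_foo numbers (foo numbers)

-- ===== LEMMAS AND PROOFS =====

theorem mod2 (n : Int) : PySem.Int.mod n 2 = n % 2 :=
  PySem.Int.mod_eq_emod_of_pos (by norm_num)

-- the 1-based positions of the odd (resp. even) elements of xs counting from i
def oddIdx (xs : List Int) (i : Int) : List Int :=
  match xs with
  | [] => []
  | n :: ns => if PySem.Int.mod n 2 = 1 then i :: oddIdx ns (i + 1) else oddIdx ns (i + 1)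

def evenIdx (xs : List Int) (i : Int) : List Int :=
  match xs with
  | [] => []
  | n :: ns => if PySem.Int.mod n 2 = 1 then evenIdx ns (i + 1) else i :: evenIdx ns (i + 1)

theorem fooLoop_eq (xs : List Int) : ∀ (i : Int) (o e : List Int),
    fooLoop xs i o e = (o ++ oddIdx xs i, e ++ evenIdx xs i) := by
  induction xs with
  | nil => simp [fooLoop, oddIdx, evenIdx]
  | cons n ns ih =>
    intro i o e
    simp only [fooLoop, oddIdx, evenIdx, mod2]
    by_cases h : n % 2 = 1 <;> simp [h, ih]

theorem fooAltCount_eq (xs : List Int) : ∀ (i c : Int),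
    xs.foldl (fun c n => if PySem.Int.mod n 2 = 1 then c + 1 else c) c
      = c + ((oddIdx xs i).length : Int) := by
  induction xs with
  | nil => simp [oddIdx]
  | cons n ns ih =>
    intro i c
    rw [List.foldl_cons, ih (i + 1)]
    simp only [oddIdx, mod2]
    by_cases h : n % 2 = 1 <;> simp [h] <;> omega

theorem idx_len (xs : List Int) : ∀ (i : Int),
    (oddIdx xs i).length + (evenIdx xs i).length = xs.length := by
  induction xs with
  | nil => simp [oddIdx, evenIdx]
  | cons n ns ih =>
    intro i
    simp only [oddIdx, evenIdx, mod2]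
    by_cases h : n % 2 = 1 <;> simp [h] <;> have := ih (i + 1) <;> omega

theorem find_odd_eq (xs : List Int) : ∀ (i : Int),
    fooAltFind xs i true = (oddIdx xs i).head? := by
  induction xs with
  | nil => simp [fooAltFind, oddIdx]
  | cons n ns ih =>
    intro i
    simp only [fooAltFind, oddIdx, mod2]
    by_cases h : n % 2 = 1 <;> simp [h, ih]

theorem find_even_eq (xs : List Int) : ∀ (i : Int),
    fooAltFind xs i false = (evenIdx xs i).head? := by
  induction xs with
  | nil => simp [fooAltFind, evenIdx]
  | cons n ns ih =>
    intro i
    simp only [fooAltFind, evenIdx, mod2]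
    by_cases h : n % 2 = 1 <;> simp [h, ih]

theorem foo_eq_alt (numbers : String) : foo numbers = foo_alt numbers := by
  unfold foo foo_alt
  cases hp : (PySem.Str.split₀ numbers).mapM PySem.Int.ofStr? with
  | none => rfl
  | some nums =>
    simp only [fooLoop_eq, fooAltCount, fooAltCount_eq nums 1, find_odd_eq, find_even_eq,
      List.nil_append, zero_add]
    have hlen := idx_len nums 1
    by_cases h1 : (oddIdx nums 1).length = 1
    · have h1' : ((oddIdx nums 1).length : Int) = 1 := by omega
      simp [h1, h1']
    · have h1' : ((oddIdx nums 1).length : Int) ≠ 1 := by omega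
      by_cases h2 : (evenIdx nums 1).length = 1
      · have h2' : (nums.length : Int) - ((oddIdx nums 1).length : Int) = 1 := by omega
        simp [h1, h1', h2, h2']
      · have h2' : (nums.length : Int) - ((oddIdx nums 1).length : Int) ≠ 1 := by omega
        simp [h1, h1', h2, h2']

-- ===== VERDICT (by name: the statement is the Claim_ definition above) =====
theorem foo_spec : Claim_equal_foo := by
  intro numbers _ _
  exact foo_eq_alt numbers
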